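-- pv_equiv track=rewrite | github.com/mojomast/swarmussy | core/devussy_integration.py | infer_agent_from_content
-- ===== SOURCE A (Python) =====
-- from typing import Optional, Tuple, List, Dict, Any
--
-- def infer_agent_from_content(content: str, project_context: Optional[Dict] = None) -> str:
--     """Infer agent from task content and project context.
--
--     Args:
--         content: Task description text
--         project_context: Optional dict with project_type, primary_language, frameworks
--
--     Returns:
--         Agent role key
--     """
--     content_lower = content.lower()
--
--     # Check project context for game engines / non-web projects
--     is_game_project = False
--     is_godot = False
--     is_unity = False
--     primary_lang = ""
--
--     if project_context:
--         project_type = str(project_context.get("project_type", "")).lower()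
--         primary_lang = str(project_context.get("primary_language", "")).lower()
--         frameworks = str(project_context.get("frameworks", "")).lower()
--
--         # Detect game engine projects
--         is_godot = "godot" in frameworks or "gdscript" in primary_lang or "godot" in project_type
--         is_unity = "unity" in frameworks or "c#" in primary_lang and "game" in project_type
--         is_game_project = is_godot or is_unity or any(kw in project_type for kw in ["game", "fps", "rpg", "engine"])
--
--     # GAME ENGINE PROJECTS - All code goes to backend_dev (who handles GDScript/C#)
--     if is_game_project:
--         # Game dev = backend_dev handles all code (GDScript, C#, etc.)
--         if any(kw in content_lower for kw in ["script", "code", "implement", "class", "function", "gdscript",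
--                                                "scene", "node", "signal", "autoload", "resource", "shader",
--                                                "physics", "collision", "mesh", "geometry", "ai", "fsm",
--                                                "player", "enemy", "weapon", "level", "spawn", "entity"]):
--             return "backend_dev"  # GDScript/game code
--
--         # UI in game engines is still code, not React
--         if any(kw in content_lower for kw in ["ui", "hud", "menu", "control", "panel", "button", "label"]):
--             return "backend_dev"  # Godot UI = GDScript, not React
--
--         # Only assign frontend_dev if explicitly web-related
--         if any(kw in content_lower for kw in ["html", "css", "react", "web page", "browser"]):
--             return "frontend_dev"
--
--     # WEB PROJECTS - Normal assignment
--     else: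
--         # Frontend indicators (only for web projects)
--         if any(kw in content_lower for kw in ["component", "react", "vue", "angular", "css", "frontend",
--                                                "page", "style", "tailwind", "html", "jsx", "tsx"]):
--             return "frontend_dev"
--
--     # Backend indicators (always valid)
--     if any(kw in content_lower for kw in ["api", "endpoint", "server", "database", "model", "backend",
--                                            "python", "fastapi", "flask", "django", "node", "express"]):
--         return "backend_dev"
--
--     # QA indicators
--     if any(kw in content_lower for kw in ["test", "pytest", "jest", "gut", "gdunit", "coverage", "lint", "quality"]):
--         return "qa_engineer"
--
--     # DevOps indicators
--     if any(kw in content_lower for kw in ["docker", "deploy", "ci/cd", "pipeline", "kubernetes", "github action", "export"]):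
--         return "devops"
--
--     # Tech writer indicators
--     if any(kw in content_lower for kw in ["documentation", "readme", "docs", "guide", "comment"]):
--         return "tech_writer"
--
--     # Database indicators
--     if any(kw in content_lower for kw in ["schema", "migration", "sql", "database design"]):
--         return "database_specialist"
--
--     return "backend_dev"  # Default
-- ===== SOURCE B (Python) =====
-- GAME_GROUPS = [
--     (("script", "code", "implement", "class", "function", "gdscript",
--       "scene", "node", "signal", "autoload", "resource", "shader",
--       "physics", "collision", "mesh", "geometry", "ai", "fsm",
--       "player", "enemy", "weapon", "level", "spawn", "entity"), "backend_dev"),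
--     (("ui", "hud", "menu", "control", "panel", "button", "label"), "backend_dev"),
--     (("html", "css", "react", "web page", "browser"), "frontend_dev"),
-- ]
-- WEB_GROUPS = [
--     (("component", "react", "vue", "angular", "css", "frontend",
--       "page", "style", "tailwind", "html", "jsx", "tsx"), "frontend_dev"),
-- ]
-- SHARED_GROUPS = [
--     (("api", "endpoint", "server", "database", "model", "backend",
--       "python", "fastapi", "flask", "django", "node", "express"), "backend_dev"),
--     (("test", "pytest", "jest", "gut", "gdunit", "coverage", "lint", "quality"), "qa_engineer"),
--     (("docker", "deploy", "ci/cd", "pipeline", "kubernetes", "github action", "export"), "devops"),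
--     (("documentation", "readme", "docs", "guide", "comment"), "tech_writer"),
--     (("schema", "migration", "sql", "database design"), "database_specialist"),
-- ]
--
--
-- def _is_game_project(ctx):
--     if not ctx:
--         return False
--     pt = str(ctx.get("project_type", "")).lower()
--     pl = str(ctx.get("primary_language", "")).lower()
--     fw = str(ctx.get("frameworks", "")).lower()
--     needles = [("godot", fw), ("gdscript", pl), ("godot", pt), ("unity", fw)] + \
--               [(kw, pt) for kw in ("game", "fps", "rpg", "engine")]
--     return ("c#" in pl and "game" in pt) or any(n in h for n, h in needles)
--
--
-- def _keyword_index(is_game_project):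
--     """Flat (keyword, priority, role) index; priority = position of the keyword's group."""
--     groups = (GAME_GROUPS if is_game_project else WEB_GROUPS) + SHARED_GROUPS
--     index = []
--     for prio, (kws, role) in enumerate(groups):
--         for kw in kws:
--             index.append((kw, prio, role))
--     return index
--
--
-- def infer_agent_from_content(content, project_context=None):
--     content_lower = content.lower()
--     best = None
--     for kw, prio, role in _keyword_index(_is_game_project(project_context)):
--         if kw in content_lower and (best is None or prio < best[0]):
--             best = (prio, role)
--     return best[1] if best is not None else "backend_dev"
-- ===== Notes on version B (the rewrite author's own statement) =====
-- stated objective: alternative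
-- what changed: Replaced A's ordered chain of group-by-group any()/early-return branches with a flat (keyword, priority, role) index built once from the mode's groups and scanned in a single pass that keeps the minimum-priority matching keyword (an argmin reduction); equal because group priorities are strictly increasing, so the minimum-priority match is exactly the first matching group.
import Mathlib
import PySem

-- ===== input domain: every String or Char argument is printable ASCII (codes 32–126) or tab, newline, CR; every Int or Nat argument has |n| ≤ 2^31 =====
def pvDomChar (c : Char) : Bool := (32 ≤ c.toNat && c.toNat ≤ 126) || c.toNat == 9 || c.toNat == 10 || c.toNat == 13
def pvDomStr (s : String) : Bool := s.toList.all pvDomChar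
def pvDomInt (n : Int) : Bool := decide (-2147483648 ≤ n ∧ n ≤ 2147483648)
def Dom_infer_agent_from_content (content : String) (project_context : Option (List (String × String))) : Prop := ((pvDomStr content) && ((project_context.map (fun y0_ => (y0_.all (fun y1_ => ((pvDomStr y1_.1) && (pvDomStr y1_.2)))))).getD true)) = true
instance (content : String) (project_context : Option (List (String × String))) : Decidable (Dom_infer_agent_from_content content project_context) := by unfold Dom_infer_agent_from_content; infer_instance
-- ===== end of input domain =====

-- B replaces A's ordered group-by-group early-return chain with a flat (keyword, priority, role)
-- index scanned once keeping the minimum-priority match (objective: alternative).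

-- Keyword lists (literal data from the Python source, shared by both ports).
def kwGame : List String := ["script", "code", "implement", "class", "function", "gdscript",
  "scene", "node", "signal", "autoload", "resource", "shader",
  "physics", "collision", "mesh", "geometry", "ai", "fsm",
  "player", "enemy", "weapon", "level", "spawn", "entity"]
def kwUI : List String := ["ui", "hud", "menu", "control", "panel", "button", "label"]
def kwWeb : List String := ["html", "css", "react", "web page", "browser"]
def kwFront : List String := ["component", "react", "vue", "angular", "css", "frontend",
  "page", "style", "tailwind", "html", "jsx", "tsx"]
def kwBackend : List String := ["api", "endpoint", "server", "database", "model", "backend",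
  "python", "fastapi", "flask", "django", "node", "express"]
def kwQA : List String := ["test", "pytest", "jest", "gut", "gdunit", "coverage", "lint", "quality"]
def kwDevops : List String := ["docker", "deploy", "ci/cd", "pipeline", "kubernetes", "github action", "export"]
def kwTW : List String := ["documentation", "readme", "docs", "guide", "comment"]
def kwDB : List String := ["schema", "migration", "sql", "database design"]

-- dict.get(k, "") — first match in the association list (Python dict keys are unique).
def pvGetD (d : List (String × String)) (k : String) : String :=
  (((d.find? (fun p => p.1 == k)).map (fun p => p.2)).getD "")

-- ===== PORT A =====
-- the shared code after the is_game_project branches (backend/qa/devops/tech-writer/db chain, then default)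
def aTail (cl : String) : String :=
  if kwBackend.any (fun kw => PySem.Str.isIn kw cl) then "backend_dev"
  else if kwQA.any (fun kw => PySem.Str.isIn kw cl) then "qa_engineer"
  else if kwDevops.any (fun kw => PySem.Str.isIn kw cl) then "devops"
  else if kwTW.any (fun kw => PySem.Str.isIn kw cl) then "tech_writer"
  else if kwDB.any (fun kw => PySem.Str.isIn kw cl) then "database_specialist"
  else "backend_dev"

def infer_agent_from_content (content : String) (project_context : Option (List (String × String))) : String :=
  let content_lower := PySem.Str.lower content
  let is_game_project : Bool :=
    match project_context with
    | none => false
    | some d =>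
      if d = [] then false   -- Python: empty dict is falsy
      else
        let project_type := PySem.Str.lower (pvGetD d "project_type")
        let primary_lang := PySem.Str.lower (pvGetD d "primary_language")
        let frameworks := PySem.Str.lower (pvGetD d "frameworks")
        let is_godot := PySem.Str.isIn "godot" frameworks || PySem.Str.isIn "gdscript" primary_lang || PySem.Str.isIn "godot" project_type
        let is_unity := PySem.Str.isIn "unity" frameworks || (PySem.Str.isIn "c#" primary_lang && PySem.Str.isIn "game" project_type)
        is_godot || is_unity || (["game", "fps", "rpg", "engine"].any (fun kw => PySem.Str.isIn kw project_type))
  if is_game_project then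
    if kwGame.any (fun kw => PySem.Str.isIn kw content_lower) then "backend_dev"
    else if kwUI.any (fun kw => PySem.Str.isIn kw content_lower) then "backend_dev"
    else if kwWeb.any (fun kw => PySem.Str.isIn kw content_lower) then "frontend_dev"
    else aTail content_lower
  else
    if kwFront.any (fun kw => PySem.Str.isIn kw content_lower) then "frontend_dev"
    else aTail content_lower

-- ===== PORT B =====
def bSharedGroups : List (List String × String) :=
  [(kwBackend, "backend_dev"), (kwQA, "qa_engineer"), (kwDevops, "devops"),
   (kwTW, "tech_writer"), (kwDB, "database_specialist")]

def bGroups (is_game_project : Bool) : List (List String × String) :=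
  (if is_game_project then
    [(kwGame, "backend_dev"), (kwUI, "backend_dev"), (kwWeb, "frontend_dev")]
   else
    [(kwFront, "frontend_dev")]) ++ bSharedGroups

-- _is_game_project: c#-and-game conjunct, then any over a flat (needle, haystack) list
def bIsGame (project_context : Option (List (String × String))) : Bool :=
  match project_context with
  | none => false
  | some d =>
    if d = [] then false
    else
      let pt := PySem.Str.lower (pvGetD d "project_type")
      let pl := PySem.Str.lower (pvGetD d "primary_language")
      let fw := PySem.Str.lower (pvGetD d "frameworks")
      let needles := [("godot", fw), ("gdscript", pl), ("godot", pt), ("unity", fw)] ++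
        (["game", "fps", "rpg", "engine"].map (fun kw => (kw, pt)))
      (PySem.Str.isIn "c#" pl && PySem.Str.isIn "game" pt) ||
        needles.any (fun p => PySem.Str.isIn p.1 p.2)

-- _keyword_index: flat (keyword, priority, role) index; priority = position of the group
def bFlatIndex : Nat → List (List String × String) → List (String × Nat × String)
  | _, [] => []
  | k, (kws, role) :: rest => kws.map (fun kw => (kw, k, role)) ++ bFlatIndex (k + 1) rest

-- the loop body: keep the minimum-priority matching keyword (strict <)
def bStep (cl : String) (best : Option (Nat × String)) (item : String × Nat × String) : Option (Nat × String) :=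
  if PySem.Str.isIn item.1 cl &&
      (match best with | none => true | some (p, _) => decide (item.2.1 < p)) then
    some (item.2.1, item.2.2)
  else best

def infer_agent_from_content_alt (content : String) (project_context : Option (List (String × String))) : String :=
  let content_lower := PySem.Str.lower content
  match (bFlatIndex 0 (bGroups (bIsGame project_context))).foldl (bStep content_lower) none with
  | some (_, role) => role
  | none => "backend_dev"

-- ===== PRECONDITION & SPEC =====
def Spec_infer_agent_from_content (content : String) (project_context : Option (List (String × String))) (out : String) : Prop := out = infer_agent_from_content_alt content project_context
instance (content : String) (project_context : Option (List (String × String))) (out : String) : Decidable (Spec_infer_agent_from_content content project_context out) := by unfold Spec_infer_agent_from_content; infer_instance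

-- ===== CLAIM (what is proved, stated in full; the proofs are below) =====
def Claim_equal_infer_agent_from_content : Prop := ∀ (content : String) (project_context : Option (List (String × String))), Dom_infer_agent_from_content content project_context → Spec_infer_agent_from_content content project_context (infer_agent_from_content content project_context)

-- ===== LEMMAS AND PROOFS =====

-- first matching group of a rule list (proof-only characterisation)
def firstHit (cl : String) : List (List String × String) → Option String
  | [] => none
  | (kws, r) :: rest =>
      if kws.any (fun kw => PySem.Str.isIn kw cl) then some r else firstHit cl rest

-- folding one group's keywords (all priority k) never displaces a best of priority q ≤ k
theorem foldl_group_some (cl : String) (kws : List String) (k : Nat) (r : String)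
    (q : Nat) (s : String) (h : q ≤ k) :
    (kws.map (fun kw => (kw, k, r))).foldl (bStep cl) (some (q, s)) = some (q, s) := by
  induction kws with
  | nil => rfl
  | cons kw rest ih =>
      have hk : ¬ k < q := by omega
      simp [bStep, hk, ih]

-- from no best, folding one group yields its (priority, role) iff the group matches
theorem foldl_group_none (cl : String) (kws : List String) (k : Nat) (r : String) :
    (kws.map (fun kw => (kw, k, r))).foldl (bStep cl) none =
      (if kws.any (fun kw => PySem.Str.isIn kw cl) then some (k, r) else none) := by
  induction kws with
  | nil => rfl
  | cons kw rest ih =>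
      cases hkw : PySem.Str.isIn kw cl with
      | true =>
          have h1 : bStep cl none (kw, k, r) = some (k, r) := by
            simp only [bStep, hkw]; rfl
          have h2 : ((kw :: rest).any (fun kw => PySem.Str.isIn kw cl)) = true := by
            simp only [List.any_cons, hkw, Bool.true_or]
          rw [List.map_cons, List.foldl_cons, h1,
            foldl_group_some cl rest k r k r (le_refl k), if_pos h2]
      | false =>
          have h1 : bStep cl none (kw, k, r) = none := by
            simp only [bStep, hkw]; rfl
          have h2 : ((kw :: rest).any (fun kw => PySem.Str.isIn kw cl)) =
              rest.any (fun kw => PySem.Str.isIn kw cl) := by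
            simp only [List.any_cons, hkw, Bool.false_or]
          rw [List.map_cons, List.foldl_cons, h1, ih, h2]

-- a best of priority q < m survives the whole flat index of later groups
theorem foldl_flat_some (cl : String) (groups : List (List String × String))
    (m q : Nat) (s : String) (h : q < m) :
    (bFlatIndex m groups).foldl (bStep cl) (some (q, s)) = some (q, s) := by
  induction groups generalizing m with
  | nil => rfl
  | cons g rest ih =>
      obtain ⟨kws, r⟩ := g
      simp only [bFlatIndex, List.foldl_append]
      rw [foldl_group_some cl kws m r q s (Nat.le_of_lt h)]
      exact ih (m + 1) (Nat.lt_succ_of_lt h)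

-- the argmin fold over the flat index computes the first matching group's role
theorem foldl_flat_none (cl : String) (groups : List (List String × String)) (m : Nat) :
    ((bFlatIndex m groups).foldl (bStep cl) none).map Prod.snd = firstHit cl groups := by
  induction groups generalizing m with
  | nil => rfl
  | cons g rest ih =>
      obtain ⟨kws, r⟩ := g
      simp only [bFlatIndex, List.foldl_append, firstHit]
      rw [foldl_group_none]
      cases hm : kws.any (fun kw => PySem.Str.isIn kw cl) with
      | true =>
          have e1 : (if (true = true) then some (m, r) else (none : Option (Nat × String))) = some (m, r) := rfl
          have e2 : (if (true = true) then some r else firstHit cl rest) = some r := rfl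
          rw [e1, e2, foldl_flat_some cl rest (m + 1) m r (Nat.lt_succ_self m)]
          rfl
      | false =>
          have e1 : (if (false = true) then some (m, r) else (none : Option (Nat × String))) = none := rfl
          have e2 : (if (false = true) then some r else firstHit cl rest) = firstHit cl rest := rfl
          rw [e1, e2]
          exact ih (m + 1)

-- A's branch chain is exactly the first hit of the assembled rule list (both flag values)
theorem chain_eq_firstHit (cl : String) (ig : Bool) :
    (if ig then
      if kwGame.any (fun kw => PySem.Str.isIn kw cl) then "backend_dev"
      else if kwUI.any (fun kw => PySem.Str.isIn kw cl) then "backend_dev"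
      else if kwWeb.any (fun kw => PySem.Str.isIn kw cl) then "frontend_dev"
      else aTail cl
    else
      if kwFront.any (fun kw => PySem.Str.isIn kw cl) then "frontend_dev"
      else aTail cl) = (firstHit cl (bGroups ig)).getD "backend_dev" := by
  cases ig <;>
    (simp only [bGroups, bSharedGroups, firstHit, aTail, List.cons_append, List.nil_append,
      Bool.false_eq_true, if_false, if_true] <;> split_ifs <;> rfl)

-- B's port as a function of the first matching group
theorem alt_eq_firstHit (content : String) (ctx : Option (List (String × String))) :
    infer_agent_from_content_alt content ctx =
      (firstHit (PySem.Str.lower content) (bGroups (bIsGame ctx))).getD "backend_dev" := by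
  have h := foldl_flat_none (PySem.Str.lower content) (bGroups (bIsGame ctx)) 0
  show (match (bFlatIndex 0 (bGroups (bIsGame ctx))).foldl
        (bStep (PySem.Str.lower content)) none with
      | some (_, role) => role
      | none => "backend_dev") = _
  rw [← h]
  cases (bFlatIndex 0 (bGroups (bIsGame ctx))).foldl (bStep (PySem.Str.lower content)) none with
  | none => rfl
  | some p => obtain ⟨q, s⟩ := p; rfl

-- Bool-level reassociation: A's flag expression equals B's conjunct-plus-flat-any expression
theorem flag_bool (g1 g2 g3 g4 c a1 a2 a3 a4 : Bool) :
    ((g1 || g2 || g3) || (g4 || (c && a1)) || (a1 || (a2 || (a3 || (a4 || false))))) =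
      ((c && a1) || (g1 || (g2 || (g3 || (g4 || (a1 || (a2 || (a3 || (a4 || false))))))))) := by
  cases g1 <;> cases g2 <;> cases g3 <;> cases g4 <;> cases c <;>
    cases a1 <;> cases a2 <;> cases a3 <;> cases a4 <;> rfl

-- ===== VERDICT (by name: the statement is the Claim_ definition above) =====
theorem infer_agent_from_content_spec : Claim_equal_infer_agent_from_content := by
  intro content project_context _
  unfold Spec_infer_agent_from_content
  rw [alt_eq_firstHit]
  unfold infer_agent_from_content
  cases project_context with
  | none => exact chain_eq_firstHit (PySem.Str.lower content) false
  | some d =>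
      by_cases hd : d = []
      · subst hd; exact chain_eq_firstHit (PySem.Str.lower content) false
      · simp only [if_neg hd, bIsGame, List.any_cons, List.any_nil, List.map_cons,
          List.map_nil, List.cons_append, List.nil_append]
        rw [flag_bool]
        exact chain_eq_firstHit (PySem.Str.lower content) _
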